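-- pv_equiv track=rewrite | github.com/NIH-NEI/RPE_Segmentation | tiletools.py | slice_area
-- ===== SOURCE A (Python) =====
-- def slice_area(asize, tsize, minovl=200):
--     aw = int(asize[1])
--     ah = int(asize[0])
--     w = int(tsize[1])
--     h = int(tsize[0])
--     #
--     res = []
--     if aw < w or ah < h:
--         return res
--     if tsize[0] <= 0 or tsize[1] <= 0:
--         res.append((0, aw-1, 0, ah-1))
--         return res
--     #
--     nxt = aw // w + 1
--     xovl = (nxt*w - aw) // (nxt - 1)
--     while xovl < minovl:
--         nxt += 1
--         xovl = (nxt*w - aw) // (nxt - 1)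
--     #
--     nyt = ah // h + 1
--     yovl = (nyt*h - ah) // (nyt - 1)
--     while yovl < minovl:
--         nyt += 1
--         yovl = (nyt*h - ah) // (nyt - 1)
--     #
--     hw = w//2
--     hh = h//2
--     xmax = aw - 1
--     ymax = ah - 1
--     #
--     xstep = aw // nxt
--     ystep = ah // nyt
--     #
--     for yc in range(nyt):
--         y0 = yc * ystep + ystep//2 - hh
--         if y0 < 0: y0 = 0
--         y1 = y0 + h - 1
--         if y1 > ymax:
--             y1 = ymax
--             y0 = y1 - h + 1
--         for xc in range(nxt):
--             x0 = xc * xstep + xstep//2 - hw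
--             if x0 < 0: x0 = 0
--             x1 = x0 + w - 1
--             if x1 > xmax:
--                 x1 = xmax
--                 x0 = x1 - w + 1
--             res.append((x0, x1, y0, y1))
--     return res
-- ===== SOURCE B (Python) =====
-- def slice_area(asize, tsize, minovl=200):
--     aw = int(asize[1])
--     ah = int(asize[0])
--     w = int(tsize[1])
--     h = int(tsize[0])
--     if aw < w or ah < h:
--         return []
--     if tsize[0] <= 0 or tsize[1] <= 0:
--         return [(0, aw - 1, 0, ah - 1)]
--
--     def count(size, tile):
--         # closed form for the number of tiles (no search loop): smallest
--         # n >= size//tile + 1 with (n*tile - size)//(n-1) >= minovl, i.e.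
--         # n*(tile-minovl) >= size-minovl, i.e. n >= ceil((size-minovl)/(tile-minovl))
--         n0 = size // tile + 1
--         if tile > minovl:
--             return max(n0, -((minovl - size) // (tile - minovl)))
--         return n0
--
--     def starts(size, tile):
--         n = count(size, tile)
--         step = size // n
--         return [min(max(c * step + step // 2 - tile // 2, 0), size - tile)
--                 for c in range(n)]
--
--     xs = starts(aw, w)
--     ys = starts(ah, h)
--     return [(x, x + w - 1, y, y + h - 1) for y in ys for x in xs]
-- ===== Notes on version B (the rewrite author's own statement) =====
-- stated objective: simpler
-- what changed: Replaces A's incremental while-loop search for the per-axis tile count by a closed-form ceiling-division formula, A's clamp-low-then-clamp-high branch sequence by a single min/max clamp of the tile start, and the fused double loop by a cartesian product of two 1D start lists; Pre_ excludes only inputs where A's search loop never terminates (so A never returns there).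
import Mathlib
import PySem

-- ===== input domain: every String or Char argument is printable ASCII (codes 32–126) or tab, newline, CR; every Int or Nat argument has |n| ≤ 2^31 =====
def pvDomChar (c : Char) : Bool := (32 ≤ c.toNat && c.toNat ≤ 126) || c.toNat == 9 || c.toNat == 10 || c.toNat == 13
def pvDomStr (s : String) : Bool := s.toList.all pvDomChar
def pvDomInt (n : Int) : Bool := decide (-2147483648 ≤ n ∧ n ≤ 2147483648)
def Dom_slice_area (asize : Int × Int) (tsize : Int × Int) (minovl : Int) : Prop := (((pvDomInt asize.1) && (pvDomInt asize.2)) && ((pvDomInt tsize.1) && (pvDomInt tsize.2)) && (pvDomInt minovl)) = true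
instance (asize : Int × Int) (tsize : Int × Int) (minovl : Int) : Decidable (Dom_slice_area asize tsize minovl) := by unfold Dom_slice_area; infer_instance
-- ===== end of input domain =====

-- B replaces A's incremental search loop for the tile count by a closed-form ceiling-division
-- formula and A's sequential low-then-high clamping by a single min/max clamp of the tile start
-- (objective: simpler; same cost).

-- ===== PORT A =====
-- A's while loop 'while (n*tile - size)//(n-1) < minovl: n += 1', with fuel
-- size.natAbs + minovl.natAbs + 2, which is exact: whenever the Python loop terminates it
-- does so within that many iterations (proved below via the closed form).
def pvAWhile (fuel : Nat) (n size tile minovl : Int) : Int :=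
  match fuel with
  | 0 => n
  | f + 1 =>
    if PySem.Int.floordiv (n * tile - size) (n - 1) < minovl then
      pvAWhile f (n + 1) size tile minovl
    else n

def slice_area (asize : Int × Int) (tsize : Int × Int) (minovl : Int) : List (Int × Int × Int × Int) :=
  let aw := asize.2
  let ah := asize.1
  let w := tsize.2
  let h := tsize.1
  if aw < w ∨ ah < h then []
  else if tsize.1 ≤ 0 ∨ tsize.2 ≤ 0 then [(0, aw - 1, 0, ah - 1)]
  else
    let nxt := pvAWhile (aw.natAbs + minovl.natAbs + 2) (PySem.Int.floordiv aw w + 1) aw w minovl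
    let nyt := pvAWhile (ah.natAbs + minovl.natAbs + 2) (PySem.Int.floordiv ah h + 1) ah h minovl
    let hw := PySem.Int.floordiv w 2
    let hh := PySem.Int.floordiv h 2
    let xmax := aw - 1
    let ymax := ah - 1
    let xstep := PySem.Int.floordiv aw nxt
    let ystep := PySem.Int.floordiv ah nyt
    (PySem.List.pyRange 0 nyt 1).foldl (fun res yc =>
      let y0 := yc * ystep + PySem.Int.floordiv ystep 2 - hh
      let y0 := if y0 < 0 then 0 else y0
      let y1 := y0 + h - 1
      let y1' := if y1 > ymax then ymax else y1
      let y0' := if y1 > ymax then y1' - h + 1 else y0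
      (PySem.List.pyRange 0 nxt 1).foldl (fun res xc =>
        let x0 := xc * xstep + PySem.Int.floordiv xstep 2 - hw
        let x0 := if x0 < 0 then 0 else x0
        let x1 := x0 + w - 1
        let x1' := if x1 > xmax then xmax else x1
        let x0' := if x1 > xmax then x1' - w + 1 else x0
        res ++ [(x0', x1', y0', y1')]) res) []

-- ===== PORT B =====
-- closed form for the number of tiles (B's 'count')
def pvCount (size tile minovl : Int) : Int :=
  let n0 := PySem.Int.floordiv size tile + 1
  if tile > minovl then
    max n0 (-(PySem.Int.floordiv (minovl - size) (tile - minovl)))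
  else n0

-- B's 'starts': the clamped start coordinate of each tile along one axis
def pvStarts (size tile minovl : Int) : List Int :=
  let n := pvCount size tile minovl
  let step := PySem.Int.floordiv size n
  (PySem.List.pyRange 0 n 1).map (fun c =>
    min (max (c * step + PySem.Int.floordiv step 2 - PySem.Int.floordiv tile 2) 0) (size - tile))

def slice_area_alt (asize : Int × Int) (tsize : Int × Int) (minovl : Int) : List (Int × Int × Int × Int) :=
  let aw := asize.2
  let ah := asize.1
  let w := tsize.2
  let h := tsize.1
  if aw < w ∨ ah < h then []
  else if tsize.1 ≤ 0 ∨ tsize.2 ≤ 0 then [(0, aw - 1, 0, ah - 1)]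
  else
    let xs := pvStarts aw w minovl
    let ys := pvStarts ah h minovl
    ys.flatMap (fun y => xs.map (fun x => (x, x + w - 1, y, y + h - 1)))

-- ===== PRECONDITION & SPEC =====
-- A's overlap-search loop for one axis terminates iff the tile exceeds minovl or the initial
-- count already satisfies the overlap bound; Pre_ excludes exactly the inputs where Python A
-- loops forever (A never returns there).
def pvAxisOk (size tile minovl : Int) : Prop :=
  minovl < tile ∨
    minovl * (PySem.Int.floordiv size tile + 1 - 1) ≤ (PySem.Int.floordiv size tile + 1) * tile - size

def Pre_slice_area (asize : Int × Int) (tsize : Int × Int) (minovl : Int) : Prop :=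
  asize.2 < tsize.2 ∨ asize.1 < tsize.1 ∨ tsize.1 ≤ 0 ∨ tsize.2 ≤ 0 ∨
    (pvAxisOk asize.2 tsize.2 minovl ∧ pvAxisOk asize.1 tsize.1 minovl)
instance (asize : Int × Int) (tsize : Int × Int) (minovl : Int) : Decidable (Pre_slice_area asize tsize minovl) := by
  unfold Pre_slice_area pvAxisOk; infer_instance

def pvWitness_slice_area : (Int × Int) × (Int × Int) × Int := ((1000, 1000), (600, 600), 200)

def Spec_slice_area (asize : Int × Int) (tsize : Int × Int) (minovl : Int) (out : List (Int × Int × Int × Int)) : Prop := out = slice_area_alt asize tsize minovl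
instance (asize : Int × Int) (tsize : Int × Int) (minovl : Int) (out : List (Int × Int × Int × Int)) : Decidable (Spec_slice_area asize tsize minovl out) := by unfold Spec_slice_area; infer_instance

-- ===== CLAIM (what is proved, stated in full; the proofs are below) =====
def Claim_equal_slice_area : Prop := ∀ (asize : Int × Int) (tsize : Int × Int) (minovl : Int), Dom_slice_area asize tsize minovl → Pre_slice_area asize tsize minovl → Spec_slice_area asize tsize minovl (slice_area asize tsize minovl)

-- ===== LEMMAS AND PROOFS =====

-- characterization of the fuelled while loop: it stops exactly at the first stopping point m
theorem pvAWhile_char (fuel : Nat) (n m size tile minovl : Int)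
    (hnm : n ≤ m)
    (hm : ¬ PySem.Int.floordiv (m * tile - size) (m - 1) < minovl)
    (hlt : ∀ k, n ≤ k → k < m → PySem.Int.floordiv (k * tile - size) (k - 1) < minovl)
    (hfuel : m - n ≤ (fuel : Int)) :
    pvAWhile fuel n size tile minovl = m := by
  induction fuel generalizing n with
  | zero =>
    have : n = m := by simpa using le_antisymm hnm (by omega)
    simpa [pvAWhile] using this
  | succ f ih =>
    unfold pvAWhile
    by_cases hc : PySem.Int.floordiv (n * tile - size) (n - 1) < minovl
    · have hlt' : n < m := by
        rcases lt_or_eq_of_le hnm with h | h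
        · exact h
        · exact absurd (h ▸ hc) hm
      simp only [if_pos hc]
      exact ih (n + 1) (by omega) (fun k hk1 hk2 => hlt k (by omega) hk2) (by omega)
    · have hnm' : n = m := by
        rcases lt_or_eq_of_le hnm with h | h
        · exact absurd (hlt n le_rfl h) hc
        · exact h
      subst hnm'
      simp [if_neg hc]

-- under Pre_, A's search loop computes B's closed-form count
theorem pvCount_eq (size tile minovl : Int) (ht : 0 < tile) (hts : tile ≤ size)
    (hok : pvAxisOk size tile minovl) :
    pvAWhile (size.natAbs + minovl.natAbs + 2) (PySem.Int.floordiv size tile + 1) size tile minovl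
      = pvCount size tile minovl := by
  set n0 := PySem.Int.floordiv size tile + 1 with hn0
  have h1 : 1 ≤ PySem.Int.floordiv size tile := by
    rw [PySem.Int.le_floordiv_iff_mul_le ht]; omega
  have hn02 : 2 ≤ n0 := by omega
  by_cases hcase : tile > minovl
  · -- closed form via ceiling division
    have hgoal : pvCount size tile minovl
        = max n0 (-(PySem.Int.floordiv (minovl - size) (tile - minovl))) := by
      simp [pvCount, if_pos hcase, ← hn0]
    rw [hgoal]
    set d := tile - minovl with hd
    have hdpos : 0 < d := by omega
    set need := -(PySem.Int.floordiv (minovl - size) d) with hneed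
    -- for any k ≥ 2: loop condition holds iff k < need
    have key : ∀ k : Int, 2 ≤ k →
        (PySem.Int.floordiv (k * tile - size) (k - 1) < minovl ↔ k < need) := by
      intro k hk
      rw [PySem.Int.floordiv_lt_iff_lt_mul (by omega : (0:Int) < k - 1)]
      have hle : need ≤ k ↔ size - minovl ≤ k * d := by
        constructor
        · intro h
          have h' : -k ≤ PySem.Int.floordiv (minovl - size) d := by omega
          rw [PySem.Int.le_floordiv_iff_mul_le hdpos] at h'
          nlinarith
        · intro h
          have h' : -k * d ≤ minovl - size := by nlinarith
          have := (PySem.Int.le_floordiv_iff_mul_le hdpos (q := -k) (a := minovl - size)).mpr h'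
          omega
      constructor
      · intro h
        by_contra hcon
        have h2 : size - minovl ≤ k * d := hle.mp (by omega)
        nlinarith
      · intro h
        have h2 : ¬ size - minovl ≤ k * d := fun hc => by
          have := hle.mpr hc; omega
        nlinarith
    -- bound on need (for the fuel)
    have hneedle : need ≤ size - minovl := by
      have h' : (minovl - size) * d ≤ minovl - size := by nlinarith
      have := (PySem.Int.le_floordiv_iff_mul_le hdpos (q := minovl - size) (a := minovl - size)).mpr h'
      omega
    refine pvAWhile_char _ _ _ _ _ _ (le_max_left _ _) ?_ ?_ ?_
    · rw [key _ (by omega)]; omega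
    · intro k hk1 hk2
      rw [key _ (by omega)]; omega
    · rcases max_cases n0 need with ⟨hmx, _⟩ | ⟨hmx, _⟩ <;> rw [hmx] <;> omega
  · -- tile ≤ minovl: Pre_ guarantees the initial count already stops
    have hstop : minovl * (n0 - 1) ≤ n0 * tile - size := by
      rcases hok with h | h
      · omega
      · exact h
    have hcount : pvCount size tile minovl = n0 := by
      simp [pvCount, if_neg hcase, ← hn0]
    rw [hcount]
    refine pvAWhile_char _ _ _ _ _ _ le_rfl ?_ (fun k hk1 hk2 => by omega) (by omega)
    rw [PySem.Int.floordiv_lt_iff_lt_mul (by omega : (0:Int) < n0 - 1)]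
    omega

-- A's clamp-low-then-clamp-high sequence (zeta-expanded) equals B's single min/max clamp,
-- stated on the 4-tuple a loop iteration appends
theorem pv_clamp4 (rawx rawy aw ah w h : Int)
    (hw : 0 < w) (hwa : w ≤ aw) (hh : 0 < h) (hha : h ≤ ah) :
    ((if (if rawx < 0 then 0 else rawx) + w - 1 > aw - 1 then
        (if (if rawx < 0 then 0 else rawx) + w - 1 > aw - 1 then aw - 1
         else (if rawx < 0 then 0 else rawx) + w - 1) - w + 1
      else if rawx < 0 then 0 else rawx),
     (if (if rawx < 0 then 0 else rawx) + w - 1 > aw - 1 then aw - 1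
      else (if rawx < 0 then 0 else rawx) + w - 1),
     (if (if rawy < 0 then 0 else rawy) + h - 1 > ah - 1 then
        (if (if rawy < 0 then 0 else rawy) + h - 1 > ah - 1 then ah - 1
         else (if rawy < 0 then 0 else rawy) + h - 1) - h + 1
      else if rawy < 0 then 0 else rawy),
     (if (if rawy < 0 then 0 else rawy) + h - 1 > ah - 1 then ah - 1
      else (if rawy < 0 then 0 else rawy) + h - 1))
    = (min (max rawx 0) (aw - w), min (max rawx 0) (aw - w) + w - 1,
       min (max rawy 0) (ah - h), min (max rawy 0) (ah - h) + h - 1) := by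
  simp only [Prod.mk.injEq, min_def, max_def]
  refine ⟨?_, ?_, ?_, ?_⟩ <;> (split_ifs <;> omega)

-- the fused double loop over clamped tile bounds equals the cartesian product of the two
-- 1D min/max-clamped start lists
theorem pv_bridge (xr yr : List Int) (aw ah w h : Int) (rx ry : Int → Int)
    (hw : 0 < w) (hwa : w ≤ aw) (hh : 0 < h) (hha : h ≤ ah) :
    List.foldl (fun res yc =>
      List.foldl (fun res xc =>
        res ++ [((if (if rx xc < 0 then 0 else rx xc) + w - 1 > aw - 1 then
                    (if (if rx xc < 0 then 0 else rx xc) + w - 1 > aw - 1 then aw - 1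
                     else (if rx xc < 0 then 0 else rx xc) + w - 1) - w + 1
                  else if rx xc < 0 then 0 else rx xc),
                 (if (if rx xc < 0 then 0 else rx xc) + w - 1 > aw - 1 then aw - 1
                  else (if rx xc < 0 then 0 else rx xc) + w - 1),
                 (if (if ry yc < 0 then 0 else ry yc) + h - 1 > ah - 1 then
                    (if (if ry yc < 0 then 0 else ry yc) + h - 1 > ah - 1 then ah - 1
                     else (if ry yc < 0 then 0 else ry yc) + h - 1) - h + 1
                  else if ry yc < 0 then 0 else ry yc),
                 (if (if ry yc < 0 then 0 else ry yc) + h - 1 > ah - 1 then ah - 1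
                  else (if ry yc < 0 then 0 else ry yc) + h - 1))]) res xr) [] yr
    = (yr.map (fun c => min (max (ry c) 0) (ah - h))).flatMap (fun y =>
        (xr.map (fun c => min (max (rx c) 0) (aw - w))).map (fun x =>
          (x, x + w - 1, y, y + h - 1))) := by
  simp only [PySem.List.foldl_append_singleton_eq_map]
  rw [PySem.List.foldl_append_eq_flatMap]
  simp only [List.nil_append, List.flatMap_map, List.map_map, Function.comp_def]
  simp only [pv_clamp4 _ _ aw ah w h hw hwa hh hha]

-- ===== VERDICT (by name: the statement is the Claim_ definition above) =====
theorem slice_area_spec : Claim_equal_slice_area := by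
  intro asize tsize minovl _ hpre
  unfold Spec_slice_area slice_area slice_area_alt pvStarts
  by_cases h1 : asize.2 < tsize.2 ∨ asize.1 < tsize.1
  · simp only [if_pos h1]
  · by_cases h2 : tsize.1 ≤ 0 ∨ tsize.2 ≤ 0
    · simp only [if_neg h1, if_pos h2]
    · have hw : 0 < tsize.2 := by omega
      have hh : 0 < tsize.1 := by omega
      have hwa : tsize.2 ≤ asize.2 := by omega
      have hha : tsize.1 ≤ asize.1 := by omega
      have hok : pvAxisOk asize.2 tsize.2 minovl ∧ pvAxisOk asize.1 tsize.1 minovl := by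
        rcases hpre with h | h | h | h | h <;> first | omega | exact h
      simp only [if_neg h1, if_neg h2,
        pvCount_eq asize.2 tsize.2 minovl hw hwa hok.1,
        pvCount_eq asize.1 tsize.1 minovl hh hha hok.2]
      exact pv_bridge (PySem.List.pyRange 0 (pvCount asize.2 tsize.2 minovl) 1)
        (PySem.List.pyRange 0 (pvCount asize.1 tsize.1 minovl) 1)
        asize.2 asize.1 tsize.2 tsize.1
        (fun c => c * PySem.Int.floordiv asize.2 (pvCount asize.2 tsize.2 minovl)
          + PySem.Int.floordiv (PySem.Int.floordiv asize.2 (pvCount asize.2 tsize.2 minovl)) 2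
          - PySem.Int.floordiv tsize.2 2)
        (fun c => c * PySem.Int.floordiv asize.1 (pvCount asize.1 tsize.1 minovl)
          + PySem.Int.floordiv (PySem.Int.floordiv asize.1 (pvCount asize.1 tsize.1 minovl)) 2
          - PySem.Int.floordiv tsize.1 2)
        hw hwa hh hha
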